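-- pv_equiv track=rewrite | github.com/squad-hedy-lamar/Desafio3-bootcamp-back-end-python-e-django | exercicio4/exercicio-resolvido.py | procurar_contato
-- ===== SOURCE A (Python) =====
-- dicionario_contatos = {
--     "João": "03398147-1234",
--     "Tereza": "07098245-6565",
--     "Elisa": "02194562-4565",
--     "Felipe": "0313245-8987",
--     "Maria": "04597895-6520",
--     "Lauro": "05199999-8585"
-- }
--
-- def procurar_contato(nome):
--     nome = nome.lower()
--
-- # lista de apoio para desconsiderar diferença de letra minuscula
--     contatos_minuscula = {k.lower(): v for k, v in dicionario_contatos.items()}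
--
--     telefone = contatos_minuscula.get(nome)
--
--     if (telefone):
-- # Buscando o nome registrado
--         nome_inicial = next(k for k, v in dicionario_contatos.items() if k.lower() == nome)
--         return(f"{nome}: {telefone}")
--     else:
--         return("O contato não foi encontrado!")
-- ===== SOURCE B (Python) =====
-- dicionario_contatos = {
--     "João": "03398147-1234",
--     "Tereza": "07098245-6565",
--     "Elisa": "02194562-4565",
--     "Felipe": "0313245-8987",
--     "Maria": "04597895-6520",
--     "Lauro": "05199999-8585"
-- }
--
-- def procurar_contato(nome):
--     nome = nome.lower()
--     for k, v in dicionario_contatos.items():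
--         if k.lower() == nome:
--             return f"{nome}: {v}"
--     return "O contato não foi encontrado!"
-- ===== Notes on version B (the rewrite author's own statement) =====
-- stated objective: simpler
-- what changed: B replaces A's materialized lowercased-dict comprehension plus .get plus a second dead next(...) scan with a single early-exit loop over the items that returns at the first case-insensitive key match.
import Mathlib
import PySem

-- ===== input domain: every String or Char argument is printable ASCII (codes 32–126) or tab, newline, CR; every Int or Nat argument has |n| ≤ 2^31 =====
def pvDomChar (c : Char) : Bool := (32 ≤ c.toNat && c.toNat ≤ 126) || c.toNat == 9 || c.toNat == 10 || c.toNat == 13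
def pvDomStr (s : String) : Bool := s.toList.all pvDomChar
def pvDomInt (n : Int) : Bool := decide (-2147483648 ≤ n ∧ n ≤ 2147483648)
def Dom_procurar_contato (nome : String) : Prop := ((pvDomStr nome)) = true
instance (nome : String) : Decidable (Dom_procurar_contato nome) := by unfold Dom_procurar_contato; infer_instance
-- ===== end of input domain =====

-- B: single early-exit loop over the items instead of A's lowercased-dict comprehension + .get + dead next(...) scan (simpler).
-- ===== PORT A =====
def dicionario_contatos : PySem.Dict String String :=
  PySem.Dict.ofList [("João", "03398147-1234"), ("Tereza", "07098245-6565"),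
    ("Elisa", "02194562-4565"), ("Felipe", "0313245-8987"),
    ("Maria", "04597895-6520"), ("Lauro", "05199999-8585")]

def procurar_contato (nome : String) : String :=
  let nome := PySem.Str.lower nome
  -- contatos_minuscula = {k.lower(): v for k, v in dicionario_contatos.items()}
  let contatos_minuscula : PySem.Dict String String :=
    dicionario_contatos.items.foldl
      (fun d kv => d.insert (PySem.Str.lower kv.1) kv.2) PySem.Dict.empty
  let telefone := contatos_minuscula.get? nome
  match telefone with
  | some telefone =>
      if telefone ≠ "" then
        -- nome_inicial = next(...)  (dead variable in A; never raises when a lowered key matched)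
        let _nome_inicial := (dicionario_contatos.items.find? (fun kv => PySem.Str.lower kv.1 == nome)).map (·.1)
        nome ++ ": " ++ telefone
      else "O contato não foi encontrado!"
  | none => "O contato não foi encontrado!"

-- ===== PORT B =====
def altLoop (nome : String) : List (String × String) → String
  | [] => "O contato não foi encontrado!"
  | (k, v) :: rest =>
      if PySem.Str.lower k == nome then nome ++ ": " ++ v else altLoop nome rest

def procurar_contato_alt (nome : String) : String :=
  altLoop (PySem.Str.lower nome) dicionario_contatos.items

-- ===== PRECONDITION & SPEC =====
def Spec_procurar_contato (nome : String) (out : String) : Prop := out = procurar_contato_alt nome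
instance (nome : String) (out : String) : Decidable (Spec_procurar_contato nome out) := by unfold Spec_procurar_contato; infer_instance

-- ===== CLAIM (what is proved, stated in full; the proofs are below) =====
def Claim_equal_procurar_contato : Prop := ∀ (nome : String), Dom_procurar_contato nome → Spec_procurar_contato nome (procurar_contato nome)

-- ===== LEMMAS AND PROOFS =====

-- ===== VERDICT (by name: the statement is the Claim_ definition above) =====
set_option maxRecDepth 8192 in
theorem procurar_contato_spec : Claim_equal_procurar_contato := by
  intro nome _
  have h1 : PySem.Str.lower "João" = "joão" := by decide
  have h2 : PySem.Str.lower "Tereza" = "tereza" := by decide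
  have h3 : PySem.Str.lower "Elisa" = "elisa" := by decide
  have h4 : PySem.Str.lower "Felipe" = "felipe" := by decide
  have h5 : PySem.Str.lower "Maria" = "maria" := by decide
  have h6 : PySem.Str.lower "Lauro" = "lauro" := by decide
  unfold Spec_procurar_contato procurar_contato procurar_contato_alt dicionario_contatos
  simp [PySem.Dict.ofList, PySem.Dict.update, PySem.Dict.insert, PySem.Dict.empty,
    PySem.Dict.get?, PySem.Dict.contains, List.find?, altLoop, h1, h2, h3, h4, h5, h6]
  clear h1 h2 h3 h4 h5 h6
  generalize PySem.Str.lower nome = m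
  split_ifs <;> try simp_all [beq_eq_decide]
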